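-- pv_equiv track=rewrite | github.com/thanhdath/grast-sql | data_processing/spider2.0/export_all_table_mappings.py | create_wildcard_mapping_strict
-- ===== SOURCE A (Python) =====
-- from typing import Dict, List, Any, Set, Tuple
--
-- def create_wildcard_mapping_strict(schema_groups: Dict[str, List[str]]) -> Dict[str, str]:
--     """
--     Create wildcard mappings ONLY for tables with truly identical schemas.
--
--     This function is more strict and only groups tables that:
--     1. Have identical schemas (column names, types, meanings)
--     2. Follow a naming pattern with different suffixes
--     3. Have the same base prefix ending with underscore
--     """
--     wildcard_mappings = {}
--
--     for signature, table_names in schema_groups.items():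
--         if len(table_names) > 1:
--             # Multiple tables with same schema - check if they follow a pattern
--             sorted_names = sorted(table_names)
--
--             # Find common prefix
--             common_prefix = ""
--             for i in range(min(len(name) for name in sorted_names)):
--                 if all(name[i] == sorted_names[0][i] for name in sorted_names):
--                     common_prefix += sorted_names[0][i]
--                 else:
--                     break
--
--             # Only create wildcard if there's a clear pattern with different suffixes
--             if common_prefix:
--                 # Check if tables have same prefix but different suffixes
--                 suffixes = set()
--                 for table_name in sorted_names:
--                     if table_name.startswith(common_prefix):
--                         suffix = table_name[len(common_prefix):]
--                         if suffix:  # Only if there's actually a suffix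
--                             suffixes.add(suffix)
--
--                 # Only create wildcard if there are multiple different suffixes
--                 if len(suffixes) > 1:
--                     # Find the last underscore in the common prefix
--                     last_underscore_pos = common_prefix.rfind('_')
--                     if last_underscore_pos != -1:
--                         # Split at the last underscore and keep everything before it
--                         base_prefix = common_prefix[:last_underscore_pos + 1]  # Include the underscore
--                         wildcard_pattern = f"{base_prefix}*"
--                         for table_name in table_names:
--                             wildcard_mappings[table_name] = wildcard_pattern
--
--     return wildcard_mappings
-- ===== SOURCE B (Python) =====
-- def create_wildcard_mapping_strict(schema_groups):
--     """Same mapping, without sorting: fold pairwise longest-common-prefix over the group."""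
--     wildcard_mappings = {}
--     for table_names in schema_groups.values():
--         if len(table_names) < 2:
--             continue
--         prefix = table_names[0]
--         for name in table_names[1:]:
--             k = 0
--             while k < len(prefix) and k < len(name) and prefix[k] == name[k]:
--                 k += 1
--             prefix = prefix[:k]
--         if not prefix:
--             continue
--         suffixes = {name[len(prefix):] for name in table_names if len(name) > len(prefix)}
--         if len(suffixes) < 2:
--             continue
--         cut = prefix.rfind('_')
--         if cut == -1:
--             continue
--         pattern = prefix[:cut + 1] + '*'
--         for name in table_names:
--             wildcard_mappings[name] = pattern
--     return wildcard_mappings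
-- ===== Notes on version B (the rewrite author's own statement) =====
-- stated objective: faster
-- what changed: B drops the sort entirely and replaces A's per-character scan over all names with a single fold of pairwise longest-common-prefix over the group, building the suffix set from the original (unsorted) names.
import Mathlib
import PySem

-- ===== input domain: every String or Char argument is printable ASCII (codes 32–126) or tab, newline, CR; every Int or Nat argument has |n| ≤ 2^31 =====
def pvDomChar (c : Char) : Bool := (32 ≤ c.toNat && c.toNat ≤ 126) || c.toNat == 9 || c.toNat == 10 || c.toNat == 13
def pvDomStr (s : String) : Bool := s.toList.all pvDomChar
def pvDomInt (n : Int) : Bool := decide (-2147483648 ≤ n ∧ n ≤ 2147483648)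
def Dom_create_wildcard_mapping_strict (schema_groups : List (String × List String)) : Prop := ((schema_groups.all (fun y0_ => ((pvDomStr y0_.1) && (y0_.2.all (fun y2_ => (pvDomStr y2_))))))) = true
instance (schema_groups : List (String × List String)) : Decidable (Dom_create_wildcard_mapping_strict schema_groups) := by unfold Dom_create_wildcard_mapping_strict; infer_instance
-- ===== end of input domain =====

-- B replaces A's sort + per-character all-names scan by a sort-free fold of pairwise
-- longest-common-prefix over the group (objective: faster, measured).

-- ===== PORT A =====
-- A's prefix loop 'for i in range(m): if all(name[i] == sorted_names[0][i] ...): common_prefix += ... else: break';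
-- the break is the stop of the recursion.  name[i] is in range whenever i < m = min(len(name)...), so
-- getElem? (= some ...) is exact for Python's name[i] here.
def pvScanAux (names : List (List Char)) (s0 : List Char) (m i : Nat) : List Char :=
  if _h : i < m then
    if names.all (fun n => n[i]? == s0[i]?) then
      s0[i]?.toList ++ pvScanAux names s0 m (i + 1)
    else []
  else []
termination_by m - i

-- one iteration of A's outer 'for signature, table_names in schema_groups.items()' loop
def pvAGroup (wm : PySem.Dict String String) (table_names : List String) : PySem.Dict String String :=
  if table_names.length > 1 then
    match PySem.List.sorted table_names (fun x => x) false with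
    | [] => wm   -- unreachable: sorted of a list of length > 1 is nonempty
    | s0 :: rest =>
      -- min(len(name) for name in sorted_names): a running minimum over the (nonnegative) lengths
      let m := (rest.map (fun n => n.toList.length)).foldl min s0.toList.length
      let cp := pvScanAux ((s0 :: rest).map String.toList) s0.toList m 0
      if cp ≠ [] then
        let suffixes : PySem.Set (List Char) :=
          (s0 :: rest).foldl (fun acc n =>
            if PySem.Chars.startswith n.toList cp then
              -- suffix = table_name[len(common_prefix):]  (slice with nonnegative start = drop)
              (if (n.toList.drop cp.length) ≠ [] then PySem.Set.add acc (n.toList.drop cp.length) else acc)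
            else acc) []
        if suffixes.length > 1 then
          let pos := PySem.Chars.rfind cp ['_']
          if pos ≠ -1 then
            -- common_prefix[:pos+1] with pos ≥ 0, then + "*"
            let pattern := String.ofList (cp.take (pos.toNat + 1) ++ ['*'])
            table_names.foldl (fun d n => PySem.Dict.insert d n pattern) wm
          else wm
        else wm
      else wm
  else wm

def create_wildcard_mapping_strict (schema_groups : List (String × List String)) : List (String × String) :=
  (schema_groups.foldl (fun wm g => pvAGroup wm g.2) PySem.Dict.empty).items

-- ===== PORT B =====
-- B's inner 'while k < len(prefix) and k < len(name) and prefix[k] == name[k]: k += 1'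
def pvLcpLen : List Char → List Char → Nat
  | a :: as, b :: bs => if a = b then pvLcpLen as bs + 1 else 0
  | _, _ => 0

-- one iteration of B's outer 'for table_names in schema_groups.values()' loop
def pvBGroup (wm : PySem.Dict String String) (table_names : List String) : PySem.Dict String String :=
  if table_names.length < 2 then wm
  else
    match table_names with
    | [] => wm  -- unreachable: length ≥ 2
    | n0 :: rest =>
      let pfx := rest.foldl (fun p n => p.take (pvLcpLen p n.toList)) n0.toList
      if pfx = [] then wm
      else
        let suffixes : PySem.Set (List Char) :=
          PySem.Set.ofList
            (((n0 :: rest).filter (fun n => pfx.length < n.toList.length)).map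
              (fun n => n.toList.drop pfx.length))
        if suffixes.length < 2 then wm
        else
          let cut := PySem.Chars.rfind pfx ['_']
          if cut = -1 then wm
          else
            let pattern := String.ofList (pfx.take (cut.toNat + 1) ++ ['*'])
            (n0 :: rest).foldl (fun d n => PySem.Dict.insert d n pattern) wm

def create_wildcard_mapping_strict_alt (schema_groups : List (String × List String)) : List (String × String) :=
  (schema_groups.foldl (fun wm g => pvBGroup wm g.2) PySem.Dict.empty).items

-- ===== PRECONDITION & SPEC =====
def Spec_create_wildcard_mapping_strict (schema_groups : List (String × List String)) (out : List (String × String)) : Prop := out = create_wildcard_mapping_strict_alt schema_groups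
instance (schema_groups : List (String × List String)) (out : List (String × String)) : Decidable (Spec_create_wildcard_mapping_strict schema_groups out) := by unfold Spec_create_wildcard_mapping_strict; infer_instance

-- ===== CLAIM (what is proved, stated in full; the proofs are below) =====
def Claim_equal_create_wildcard_mapping_strict : Prop := ∀ (schema_groups : List (String × List String)), Dom_create_wildcard_mapping_strict schema_groups → Spec_create_wildcard_mapping_strict schema_groups (create_wildcard_mapping_strict schema_groups)

-- ===== LEMMAS AND PROOFS =====

-- proof-side longest common prefix of two char lists
def pvLcp : List Char → List Char → List Char
  | a :: as, b :: bs => if a = b then a :: pvLcp as bs else []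
  | _, _ => []

theorem pvLcp_nil_left (b : List Char) : pvLcp [] b = [] := by cases b <;> rfl

theorem pvLcp_nil_right (a : List Char) : pvLcp a [] = [] := by cases a <;> rfl

theorem take_pvLcpLen (a b : List Char) : a.take (pvLcpLen a b) = pvLcp a b := by
  induction a generalizing b with
  | nil => cases b <;> rfl
  | cons x xs ih =>
    cases b with
    | nil => rfl
    | cons y ys =>
      simp only [pvLcpLen, pvLcp]
      split <;> simp [ih]

theorem pvLcp_prefix_left (a b : List Char) : pvLcp a b <+: a := by
  induction a generalizing b with
  | nil => simp [pvLcp_nil_left]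
  | cons x xs ih =>
    cases b with
    | nil => simp [pvLcp_nil_right]
    | cons y ys =>
      simp only [pvLcp]
      split
      · exact List.cons_prefix_cons.mpr ⟨rfl, ih ys⟩
      · exact List.nil_prefix

theorem pvLcp_comm (a b : List Char) : pvLcp a b = pvLcp b a := by
  induction a generalizing b with
  | nil => simp [pvLcp_nil_left, pvLcp_nil_right]
  | cons x xs ih =>
    cases b with
    | nil => rfl
    | cons y ys =>
      simp only [pvLcp]
      by_cases h : x = y
      · subst h; simp [ih]
      · simp [h, Ne.symm h]

theorem pvLcp_prefix_right (a b : List Char) : pvLcp a b <+: b := by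
  rw [pvLcp_comm]; exact pvLcp_prefix_left b a

theorem pvLcp_assoc (a b c : List Char) : pvLcp (pvLcp a b) c = pvLcp a (pvLcp b c) := by
  induction a generalizing b c with
  | nil => simp [pvLcp_nil_left]
  | cons x xs ih =>
    cases b with
    | nil => simp [pvLcp_nil_left, pvLcp_nil_right]
    | cons y ys =>
      cases c with
      | nil => simp [pvLcp_nil_right]
      | cons z zs =>
        simp only [pvLcp]
        by_cases hxy : x = y
        · subst hxy
          by_cases hxz : x = z
          · subst hxz; simp [pvLcp, ih]
          · simp [pvLcp, hxz, pvLcp_nil_right]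
        · by_cases hyz : y = z
          · subst hyz; simp [pvLcp, hxy, pvLcp_nil_left]
          · simp [pvLcp, hxy, hyz, pvLcp_nil_left]

theorem pvLcp_of_prefix {d a : List Char} (h : d <+: a) : pvLcp a d = d := by
  induction d generalizing a with
  | nil => simp [pvLcp_nil_right]
  | cons x xs ih =>
    obtain ⟨t, ht⟩ := h
    subst ht
    simp [pvLcp, ih (List.prefix_append xs t)]

theorem pvLcp_rcomm (b a₁ a₂ : List Char) : pvLcp (pvLcp b a₁) a₂ = pvLcp (pvLcp b a₂) a₁ := by
  rw [pvLcp_assoc, pvLcp_assoc, pvLcp_comm a₁ a₂]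

theorem foldl_pvLcp_prefix (l : List (List Char)) (x : List Char) :
    (l.foldl pvLcp x <+: x) ∧ ∀ y ∈ l, l.foldl pvLcp x <+: y := by
  induction l generalizing x with
  | nil => simp
  | cons h t ih =>
    refine ⟨?_, ?_⟩
    · exact ((ih (pvLcp x h)).1).trans (pvLcp_prefix_left x h)
    · intro y hy
      rcases List.mem_cons.mp hy with rfl | hy
      · exact ((ih (pvLcp x y)).1).trans (pvLcp_prefix_right x y)
      · exact (ih (pvLcp x h)).2 y hy

theorem foldl_pvLcp_lcp (l : List (List Char)) (x y : List Char) :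
    l.foldl pvLcp (pvLcp x y) = pvLcp x (l.foldl pvLcp y) := by
  induction l generalizing y with
  | nil => simp
  | cons h t ih =>
    simp only [List.foldl_cons]
    rw [pvLcp_assoc, ih]

theorem foldl_pvLcp_mem {x h : List Char} {t : List (List Char)} (hx : x ∈ h :: t) :
    (h :: t).foldl pvLcp x = t.foldl pvLcp h := by
  simp only [List.foldl_cons]
  rw [foldl_pvLcp_lcp]
  rcases List.mem_cons.mp hx with rfl | hx
  · exact pvLcp_of_prefix (foldl_pvLcp_prefix t x).1
  · exact pvLcp_of_prefix ((foldl_pvLcp_prefix t h).2 x hx)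

theorem foldl_pvLcp_nil (l : List (List Char)) : l.foldl pvLcp [] = [] := by
  induction l with
  | nil => rfl
  | cons h t ih => simpa [pvLcp_nil_left] using ih

theorem foldl_pvLcp_cons (c : Char) (l : List (List Char)) (x : List Char) :
    (l.map (c :: ·)).foldl pvLcp (c :: x) = c :: l.foldl pvLcp x := by
  induction l generalizing x with
  | nil => rfl
  | cons h t ih => simpa [pvLcp] using ih (pvLcp x h)

theorem pvScan_rhs_nil (t : List (List Char)) (s0 : List Char) (i : Nat)
    (h : (t.map List.length).foldl min s0.length ≤ i) :
    (t.map (List.drop i)).foldl pvLcp (s0.drop i) = [] := by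
  rcases PySem.List.foldl_min_mem (t.map List.length) s0.length with hmem | hmem
  · have : s0.drop i = [] := List.drop_eq_nil_iff.mpr (by omega)
    rw [this, foldl_pvLcp_nil]
  · obtain ⟨n, hn, hlen⟩ := List.mem_map.mp hmem
    have hnil : n.drop i = [] := List.drop_eq_nil_iff.mpr (by omega)
    have := (foldl_pvLcp_prefix (t.map (List.drop i)) (s0.drop i)).2 (n.drop i)
      (List.mem_map.mpr ⟨n, hn, rfl⟩)
    rw [hnil] at this
    exact List.prefix_nil.mp this

-- A's character-position scan over all names computes the fold of pairwise LCPs of the tails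
theorem pvScanAux_eq_aux (t : List (List Char)) (s0 : List Char) (d : Nat) :
    ∀ i, (t.map List.length).foldl min s0.length - i ≤ d →
    pvScanAux (s0 :: t) s0 ((t.map List.length).foldl min s0.length) i
      = (t.map (List.drop i)).foldl pvLcp (s0.drop i) := by
  induction d with
  | zero =>
    intro i hi
    rw [pvScanAux, dif_neg (by omega)]
    exact (pvScan_rhs_nil t s0 i (by omega)).symm
  | succ d ih =>
    intro i hi
    by_cases hlt : i < (t.map List.length).foldl min s0.length
    · have hle := PySem.List.foldl_min_le (t.map List.length) s0.length
      have hs0 : i < s0.length := by omega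
      have hlenmem : ∀ n ∈ t, i < n.length := by
        intro n hn
        have := hle.2 n.length (List.mem_map.mpr ⟨n, hn, rfl⟩)
        omega
      rw [pvScanAux, dif_pos hlt]
      by_cases hall : ((s0 :: t).all (fun n => n[i]? == s0[i]?)) = true
      · rw [if_pos hall]
        have hchar : ∀ n ∈ t, n.drop i = s0[i] :: n.drop (i + 1) := by
          intro n hn
          have h1 := List.all_eq_true.mp hall n (List.mem_cons_of_mem _ hn)
          have h2 : n[i]? = s0[i]? := by simpa using h1
          rw [List.getElem?_eq_getElem (hlenmem n hn), List.getElem?_eq_getElem hs0] at h2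
          rw [← List.getElem_cons_drop (hlenmem n hn)]
          simp at h2
          rw [h2]
        have hmap : t.map (List.drop i) = (t.map (List.drop (i + 1))).map (s0[i] :: ·) := by
          rw [List.map_map]
          exact List.map_congr_left hchar
        rw [hmap, ← List.getElem_cons_drop hs0, foldl_pvLcp_cons,
          List.getElem?_eq_getElem hs0]
        have := ih (i + 1) (by omega)
        simp only [this]
        rfl
      · rw [if_neg hall]
        symm
        rw [List.all_eq_true] at hall
        simp only [not_forall] at hall
        obtain ⟨n, hn, hne⟩ := hall
        have hn' : n ∈ t := by
          rcases List.mem_cons.mp hn with rfl | h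
          · simp at hne
          · exact h
        have hne' : n[i]'(hlenmem n hn') ≠ s0[i]'hs0 := by
          intro h
          apply hne
          rw [List.getElem?_eq_getElem (hlenmem n hn'), List.getElem?_eq_getElem hs0, h]
          simp
        set R := (t.map (List.drop i)).foldl pvLcp (s0.drop i) with hR
        have hp1 : R <+: s0.drop i := (foldl_pvLcp_prefix _ _).1
        have hp2 : R <+: n.drop i := (foldl_pvLcp_prefix _ _).2 _ (List.mem_map.mpr ⟨n, hn', rfl⟩)
        rw [← List.getElem_cons_drop hs0] at hp1
        rw [← List.getElem_cons_drop (hlenmem n hn')] at hp2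
        cases hRc : R with
        | nil => rfl
        | cons c cs =>
          rw [hRc] at hp1 hp2
          have e1 := (List.cons_prefix_cons.mp hp1).1
          have e2 := (List.cons_prefix_cons.mp hp2).1
          exact absurd (e2.symm.trans e1) hne'
    · rw [pvScanAux, dif_neg hlt]
      exact (pvScan_rhs_nil t s0 i (by omega)).symm

theorem setOfList_perm {xs ys : List (List Char)} (h : xs.Perm ys) :
    (PySem.Set.ofList xs).Perm (PySem.Set.ofList ys) :=
  (List.perm_ext_iff_of_nodup (PySem.Set.nodup_ofList xs) (PySem.Set.nodup_ofList ys)).mpr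
    (fun a => by rw [PySem.Set.mem_ofList, PySem.Set.mem_ofList]; exact h.mem_iff)

-- the number of distinct nonempty suffixes, and the shared tail of both group bodies
def pvSetLen (src : List String) (cp : List Char) : Nat :=
  (PySem.Set.ofList ((src.filter (fun n => decide (cp.length < n.toList.length))).map
    (fun n => n.toList.drop cp.length))).length

def pvCore (wm : PySem.Dict String String) (tn src : List String) (cp : List Char) :
    PySem.Dict String String :=
  if cp = [] then wm
  else if 1 < pvSetLen src cp then
    if PySem.Chars.rfind cp ['_'] = -1 then wm
    else tn.foldl (fun d n => PySem.Dict.insert d n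
      (String.ofList (cp.take ((PySem.Chars.rfind cp ['_']).toNat + 1) ++ ['*']))) wm
  else wm

theorem pvSetLen_perm {xs ys : List String} (h : xs.Perm ys) (cp : List Char) :
    pvSetLen xs cp = pvSetLen ys cp :=
  (setOfList_perm ((h.filter _).map _)).length_eq

theorem pvB_shape (wm : PySem.Dict String String) (n0 : String) (rs : List String) :
    pvBGroup wm (n0 :: rs)
      = if (n0 :: rs).length < 2 then wm
        else pvCore wm (n0 :: rs) (n0 :: rs)
          (rs.foldl (fun p n => p.take (pvLcpLen p n.toList)) n0.toList) := by
  rw [pvBGroup]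
  by_cases hl : (n0 :: rs).length < 2
  · rw [if_pos hl, if_pos hl]
  · rw [if_neg hl, if_neg hl]
    simp only [pvCore, pvSetLen]
    split_ifs <;> first | rfl | omega

theorem pvA_shape (wm : PySem.Dict String String) (tn : List String) (s0 : String)
    (rest : List String) (hlen : tn.length > 1)
    (hsort : PySem.List.sorted tn (fun x => x) false = s0 :: rest)
    (hpref : ∀ n ∈ s0 :: rest,
      pvScanAux ((s0 :: rest).map String.toList) s0.toList
        ((rest.map (fun n => n.toList.length)).foldl min s0.toList.length) 0 <+: n.toList) :
    pvAGroup wm tn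
      = pvCore wm tn (s0 :: rest)
          (pvScanAux ((s0 :: rest).map String.toList) s0.toList
            ((rest.map (fun n => n.toList.length)).foldl min s0.toList.length) 0) := by
  set cp := pvScanAux ((s0 :: rest).map String.toList) s0.toList
    ((rest.map (fun n => n.toList.length)).foldl min s0.toList.length) 0 with hcp
  have hsuf : (s0 :: rest).foldl (fun acc n =>
        if PySem.Chars.startswith n.toList cp then
          (if (n.toList.drop cp.length) ≠ [] then PySem.Set.add acc (n.toList.drop cp.length)
           else acc)
        else acc) []
      = PySem.Set.ofList (((s0 :: rest).filter
          (fun n => decide (cp.length < n.toList.length))).map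
          (fun n => n.toList.drop cp.length)) := by
    rw [PySem.List.foldl_congr_mem (s0 :: rest) _
      (fun acc n => if cp.length < n.toList.length
        then PySem.Set.add acc (n.toList.drop cp.length) else acc) []
      (by
        intro acc n hn
        rw [if_pos ((PySem.Chars.startswith_iff _ _).mpr (hpref n hn))]
        refine if_congr ?_ rfl rfl
        rw [Ne, List.drop_eq_nil_iff]
        omega)]
    rw [PySem.List.foldl_ite_eq_foldl_filter, PySem.Set.ofList_eq_foldl, List.foldl_map]
  simp only [pvAGroup, hsort, if_pos hlen, ← hcp, hsuf, pvCore, pvSetLen]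
  split_ifs <;> first | rfl | omega | simp_all

theorem pvA_neg_shape (wm : PySem.Dict String String) (tn : List String)
    (h : ¬ tn.length > 1) : pvAGroup wm tn = wm := by
  rw [pvAGroup.eq_def, if_neg h]

-- the two per-group bodies agree
theorem group_eq (wm : PySem.Dict String String) (tn : List String) :
    pvAGroup wm tn = pvBGroup wm tn := by
  by_cases hlen : tn.length > 1
  · obtain ⟨n0, rs, rfl⟩ : ∃ n0 rs, tn = n0 :: rs := by
      cases tn with
      | nil => simp at hlen
      | cons a b => exact ⟨a, b, rfl⟩
    have hperm := PySem.List.sorted_perm (n0 :: rs) (fun x : String => x) false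
    obtain ⟨s0, rest, hsort⟩ : ∃ s0 rest,
        PySem.List.sorted (n0 :: rs) (fun x : String => x) false = s0 :: rest := by
      cases hq : PySem.List.sorted (n0 :: rs) (fun x : String => x) false with
      | nil => rw [hq] at hperm; have := hperm.length_eq; simp at this
      | cons a b => exact ⟨a, b, rfl⟩
    rw [hsort] at hperm
    -- A's scan is the fold of pairwise LCPs over the sorted tail
    have hscan : pvScanAux ((s0 :: rest).map String.toList) s0.toList
          ((rest.map (fun n => n.toList.length)).foldl min s0.toList.length) 0
        = (rest.map String.toList).foldl pvLcp s0.toList := by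
      have hm : (rest.map (fun n : String => n.toList.length))
          = (rest.map String.toList).map List.length := by
        rw [List.map_map]; rfl
      rw [List.map_cons, hm, pvScanAux_eq_aux (rest.map String.toList) s0.toList
        (((rest.map String.toList).map List.length).foldl min s0.toList.length) 0 (by omega)]
      congr 1
      rw [show (List.drop 0 : List Char → List Char) = id from funext fun l => List.drop_zero,
        List.map_id]
    -- every table name has the common prefix
    have hpref : ∀ n ∈ s0 :: rest,
        pvScanAux ((s0 :: rest).map String.toList) s0.toList
          ((rest.map (fun n => n.toList.length)).foldl min s0.toList.length) 0 <+: n.toList := by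
      intro n hn
      rw [hscan]
      rcases List.mem_cons.mp hn with rfl | hn
      · exact (foldl_pvLcp_prefix _ _).1
      · exact (foldl_pvLcp_prefix _ _).2 _ (List.mem_map.mpr ⟨n, hn, rfl⟩)
    -- both sides compute the same common prefix
    haveI : RightCommutative pvLcp := ⟨pvLcp_rcomm⟩
    have hcpB : pvScanAux ((s0 :: rest).map String.toList) s0.toList
          ((rest.map (fun n => n.toList.length)).foldl min s0.toList.length) 0
        = rs.foldl (fun p n => p.take (pvLcpLen p n.toList)) n0.toList := by
      rw [hscan]
      have hmem' : s0.toList ∈ n0.toList :: rs.map String.toList := by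
        simpa using List.mem_map.mpr ⟨s0, hperm.mem_iff.mp (List.mem_cons_self ..), rfl⟩
      calc (rest.map String.toList).foldl pvLcp s0.toList
          = ((s0 :: rest).map String.toList).foldl pvLcp s0.toList := by
            rw [List.map_cons]
            exact (foldl_pvLcp_mem (List.mem_cons_self ..)).symm
        _ = ((n0 :: rs).map String.toList).foldl pvLcp s0.toList :=
            (hperm.map String.toList).foldl_eq s0.toList
        _ = (rs.map String.toList).foldl pvLcp n0.toList := by
            rw [List.map_cons]
            exact foldl_pvLcp_mem hmem'
        _ = rs.foldl (fun p n => p.take (pvLcpLen p n.toList)) n0.toList := by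
            rw [List.foldl_map]
            exact PySem.List.foldl_congr_mem rs _ _ n0.toList
              (fun acc n _ => (take_pvLcpLen acc n.toList).symm)
    rw [pvA_shape wm (n0 :: rs) s0 rest hlen hsort hpref, pvB_shape,
      if_neg (by omega : ¬ (n0 :: rs).length < 2), hcpB]
    -- only the suffix-set length depends on which permutation of the group is scanned
    unfold pvCore
    rw [pvSetLen_perm hperm]
  · cases tn with
    | nil => rfl
    | cons a b =>
      rw [pvA_neg_shape wm (a :: b) hlen, pvB_shape, if_pos (by omega)]

-- ===== VERDICT (by name: the statement is the Claim_ definition above) =====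
theorem create_wildcard_mapping_strict_spec : Claim_equal_create_wildcard_mapping_strict := by
  intro sg _
  show _ = _
  unfold create_wildcard_mapping_strict create_wildcard_mapping_strict_alt
  rw [PySem.List.foldl_congr_mem sg _ _ _ (fun acc x _ => group_eq acc x.2)]
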